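-- pv_equiv track=rewrite | github.com/jamestwebber/pytorch | torch/testing/_internal/expecttest.py | nth_eol
-- ===== SOURCE A (Python) =====
-- def nth_eol(src, lineno):
--     """
--     Compute the ending index of the n-th line (before the newline,
--     where n is 1-indexed)
--
--     >>> nth_eol("aaa\\nbb\\nc", 2)
--     6
--     """
--     assert lineno >= 1
--     pos = -1
--     for _ in range(lineno):
--         pos = src.find('\n', pos + 1)
--         if pos == -1:
--             return len(src)
--     return pos
-- ===== SOURCE B (Python) =====
-- def nth_eol(src, lineno):
--     assert lineno >= 1
--     lines = src.split('\n')
--     if lineno >= len(lines):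
--         return len(src)
--     return sum(len(l) + 1 for l in lines[:lineno - 1]) + len(lines[lineno - 1])
-- ===== Notes on version B (the rewrite author's own statement) =====
-- stated objective: alternative
-- what changed: Replaces the iterated src.find('\n', pos+1) scan loop with a one-shot split('\n') and a cumulative-length sum over the first lineno-1 segments.
import Mathlib
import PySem

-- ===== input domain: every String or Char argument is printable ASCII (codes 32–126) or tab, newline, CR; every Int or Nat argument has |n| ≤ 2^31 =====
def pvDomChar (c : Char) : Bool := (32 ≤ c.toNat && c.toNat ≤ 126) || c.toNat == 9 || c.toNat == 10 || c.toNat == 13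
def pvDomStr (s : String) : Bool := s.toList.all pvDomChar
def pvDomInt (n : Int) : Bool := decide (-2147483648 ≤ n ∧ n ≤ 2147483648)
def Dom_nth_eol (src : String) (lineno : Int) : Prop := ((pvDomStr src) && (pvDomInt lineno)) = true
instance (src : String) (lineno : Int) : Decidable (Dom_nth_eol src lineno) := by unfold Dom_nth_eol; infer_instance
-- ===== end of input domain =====

-- B replaces A's iterated find('\n', pos+1) scan loop by a one-shot split('\n') plus a cumulative-length sum (alternative decomposition, same cost).

-- ===== PORT A =====
-- 'for _ in range(lineno)' with early return, as recursion on the remaining iteration count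
def nthEolGo (src : String) : Nat → Int → Int
  | 0, pos => pos
  | n+1, pos =>
    let p := PySem.Str.findFrom src "\n" (pos + 1) none
    if p = -1 then PySem.Str.len src else nthEolGo src n p

def nth_eol (src : String) (lineno : Int) : Int :=
  nthEolGo src lineno.toNat (-1)

-- ===== PORT B =====
-- lines[lineno-1] is in range under the guard and Pre_, so pyGetD's default is never used
def nth_eol_alt (src : String) (lineno : Int) : Int :=
  let lines := (PySem.Str.split? src "\n").getD []
  if (lines.length : Int) ≤ lineno then PySem.Str.len src
  else
    (PySem.List.slice lines none (some (lineno - 1))).foldl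
      (fun acc l => acc + PySem.Str.len l + 1) 0
    + PySem.Str.len (PySem.List.pyGetD lines (lineno - 1) "")

-- ===== PRECONDITION & SPEC =====
-- Pre_ excludes exactly the inputs on which A's `assert lineno >= 1` raises AssertionError.
def Pre_nth_eol (src : String) (lineno : Int) : Prop := 1 ≤ lineno
instance (src : String) (lineno : Int) : Decidable (Pre_nth_eol src lineno) := by
  unfold Pre_nth_eol; infer_instance

def pvWitness_nth_eol : String × Int := ("aaa\nbb\nc", 2)

def Spec_nth_eol (src : String) (lineno : Int) (out : Int) : Prop := out = nth_eol_alt src lineno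
instance (src : String) (lineno : Int) (out : Int) : Decidable (Spec_nth_eol src lineno out) := by
  unfold Spec_nth_eol; infer_instance

-- ===== CLAIM (what is proved, stated in full; the proofs are below) =====
def Claim_equal_nth_eol : Prop := ∀ (src : String) (lineno : Int), Dom_nth_eol src lineno → Pre_nth_eol src lineno → Spec_nth_eol src lineno (nth_eol src lineno)

-- ===== LEMMAS AND PROOFS =====

-- reference splitter: split a char list on a single separator char
def splitCh (a : Char) : List Char → List (List Char)
  | [] => [[]]
  | c :: t => if c = a then [] :: splitCh a t else (splitCh a t).modifyHead (c :: ·)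

-- char-level image of A's loop
def cGo (a : Char) (cs : List Char) : Nat → Int → Int
  | 0, pos => pos
  | n+1, pos =>
    if PySem.Chars.findFrom cs [a] (pos + 1) none = -1 then (cs.length : Int)
    else cGo a cs n (PySem.Chars.findFrom cs [a] (pos + 1) none)

-- char-level image of B
def bVal (cs : List Char) (lineno : Int) : Int :=
  let lines := PySem.Chars.splitOn cs ['\n']
  if (lines.length : Int) ≤ lineno then (cs.length : Int)
  else
    (PySem.List.slice lines none (some (lineno - 1))).foldl
      (fun acc l => acc + (l.length : Int) + 1) 0
    + ((PySem.List.pyGetD lines (lineno - 1) []).length : Int)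

theorem nthEolGo_eq_cGo (src : String) (n : Nat) (pos : Int) :
    nthEolGo src n pos = cGo '\n' src.toList n pos := by
  induction n generalizing pos with
  | zero => rfl
  | succ n ih =>
    simp only [nthEolGo, cGo, PySem.Str.findFrom_eq, PySem.Str.len_eq]
    have h : ("\n" : String).toList = ['\n'] := by decide
    rw [h]
    split <;> simp [ih]

theorem splitOn_go_eq (a : Char) :
    ∀ (fuel : Nat) (l cur : List Char) (accs : List (List Char)), l.length ≤ fuel →
      PySem.Chars.splitOn.go [a] fuel l cur accs
        = accs.reverse ++ (splitCh a l).modifyHead (cur.reverse ++ ·) := by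
  intro fuel
  induction fuel with
  | zero =>
    intro l cur accs hl
    have : l = [] := List.length_eq_zero_iff.1 (Nat.le_zero.1 hl)
    subst this
    simp [PySem.Chars.splitOn.go, splitCh]
  | succ fuel ih =>
    intro l cur accs hl
    cases l with
    | nil => simp [PySem.Chars.splitOn.go, splitCh]
    | cons c rest =>
      rw [PySem.Chars.splitOn.go]
      by_cases hc : a = c
      · subst hc
        have hpre : List.isPrefixOf [a] (a :: rest) = true := by simp [List.isPrefixOf]
        rw [if_pos hpre]
        have hdrop : List.drop ([a] : List Char).length (a :: rest) = rest := by simp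
        rw [hdrop]
        rw [ih rest [] (cur.reverse :: accs) (by simpa using Nat.lt_succ_iff.mp (by simpa using hl))]
        simp [splitCh]
        exact congrFun List.modifyHead_id _
      · have hpre : List.isPrefixOf [a] (c :: rest) = false := by simp [List.isPrefixOf, hc]
        rw [hpre]
        simp only [Bool.false_eq_true, if_false]
        rw [ih rest (c :: cur) accs (by simpa using Nat.lt_succ_iff.mp (by simpa using hl))]
        simp [splitCh, Ne.symm hc]
        cases h : splitCh a rest with
        | nil => simp
        | cons x xs => simp

theorem splitOn_eq_splitCh (a : Char) (cs : List Char) :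
    PySem.Chars.splitOn cs [a] = splitCh a cs := by
  unfold PySem.Chars.splitOn
  rw [splitOn_go_eq a (cs.length + 1) cs [] [] (by omega)]
  simp
  exact congrFun List.modifyHead_id _

theorem length_splitCh (a : Char) (cs : List Char) :
    (splitCh a cs).length = cs.count a + 1 := by
  induction cs with
  | nil => simp [splitCh]
  | cons c t ih =>
    by_cases h : c = a
    · subst h; simp [splitCh, ih, List.count_cons]
    · simp [splitCh, h, ih]

theorem splitCh_not_mem (a : Char) (cs : List Char) (h : a ∉ cs) : splitCh a cs = [cs] := by
  induction cs with
  | nil => rfl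
  | cons c t ih =>
    simp only [List.mem_cons, not_or] at h
    simp [splitCh, Ne.symm h.1, ih h.2]

theorem splitCh_first (a : Char) (p t : List Char) (hp : a ∉ p) :
    splitCh a (p ++ a :: t) = p :: splitCh a t := by
  induction p with
  | nil => simp [splitCh]
  | cons c p' ih =>
    simp only [List.mem_cons, not_or] at hp
    simp [splitCh, Ne.symm hp.1, ih hp.2]

theorem find_go_singleton (a : Char) :
    ∀ (l : List Char) (k : Nat),
      PySem.Chars.find.go [a] l k = if a ∈ l then ((k + l.idxOf a : Nat) : Int) else -1 := by
  intro l
  induction l with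
  | nil => intro k; simp [PySem.Chars.find.go]
  | cons c t ih =>
    intro k
    rw [PySem.Chars.find.go]
    by_cases hc : a = c
    · subst hc
      simp [List.isPrefixOf]
    · have hpre : List.isPrefixOf [a] (c :: t) = false := by
        simp [List.isPrefixOf, hc]
      rw [hpre]
      simp only [Bool.false_eq_true, if_false]
      rw [ih (k+1)]
      have hbc : (c == a) = false := by simp [Ne.symm hc]
      by_cases hm : a ∈ t
      · simp [hm, List.mem_cons, hc, List.idxOf_cons, hbc]
        ring
      · simp [hm, List.mem_cons, hc]

theorem find_singleton (a : Char) (l : List Char) :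
    PySem.Chars.find l [a] = if a ∈ l then ((l.idxOf a : Nat) : Int) else -1 := by
  have := find_go_singleton a l 0
  simpa [PySem.Chars.find] using this

theorem exists_first_split (a : Char) (cs : List Char) (h : a ∈ cs) :
    ∃ p t, cs = p ++ a :: t ∧ a ∉ p := by
  induction cs with
  | nil => cases h
  | cons c r ih =>
    by_cases hc : c = a
    · exact ⟨[], r, by simp [hc], by simp⟩
    · have h' : a ∈ r := by
        rcases List.mem_cons.1 h with h | h
        · exact absurd h.symm hc
        · exact h
      rcases ih h' with ⟨p, t, h1, h2⟩
      exact ⟨c :: p, t, by simp [h1], by simp [h2, Ne.symm hc]⟩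

theorem cGo_shift (a : Char) (p t : List Char) (hp : a ∉ p) :
    ∀ (n : Nat) (q : Int), -1 ≤ q → q + 1 ≤ (t.length : Int) →
      cGo a (p ++ a :: t) n ((p.length : Int) + 1 + q) = (p.length : Int) + 1 + cGo a t n q := by
  intro n
  induction n with
  | zero => intro q _ _; simp [cGo]
  | succ n ih =>
    intro q hq1 hq2
    have hm : (q + 1) = (((q + 1).toNat : Nat) : Int) := by omega
    set m : Nat := (q + 1).toNat with hmdef
    have hmt : m ≤ t.length := by omega
    have hk : p.length + 1 + m ≤ (p ++ a :: t).length := by simp; omega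
    have hstart : (p.length : Int) + 1 + q + 1 = ((p.length + 1 + m : Nat) : Int) := by push_cast; omega
    have hdrop : List.drop (p.length + 1 + m) (p ++ a :: t) = List.drop m t := by
      have h1 : p.length + 1 + m = p.length + (m + 1) := by omega
      rw [h1, List.drop_append]
      simp [List.drop_eq_nil_of_le]
    have hfind2 : PySem.Chars.findFrom t [a] (q + 1) none
        = if PySem.Chars.find (List.drop m t) [a] = -1 then -1
          else (m : Int) + PySem.Chars.find (List.drop m t) [a] := by
      rw [hm, PySem.Chars.findFrom_natCast _ _ _ hmt]
    rw [cGo, cGo, hstart, PySem.Chars.findFrom_natCast _ _ _ hk, hdrop, hfind2, find_singleton]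
    by_cases hmem : a ∈ List.drop m t
    · have hidx : List.idxOf a (List.drop m t) < (List.drop m t).length := List.idxOf_lt_length_of_mem hmem
      have hlen : (List.drop m t).length = t.length - m := by simp
      set j : Nat := List.idxOf a (List.drop m t) with hjdef
      simp only [hmem, if_true]
      have hj : ¬ ((j : Int) = -1) := by omega
      simp only [if_neg hj]
      rw [if_neg (by omega : ¬ (((p.length + 1 + m : Nat) : Int) + (j : Int) = -1)),
          if_neg (by omega : ¬ ((m : Int) + (j : Int) = -1))]
      have harg : ((p.length + 1 + m : Nat) : Int) + (j : Int) = (p.length : Int) + 1 + ((m : Int) + j) := by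
        push_cast; ring
      rw [harg, ih ((m : Int) + j) (by omega) (by push_cast; omega)]
    · simp only [hmem, if_false]
      norm_num [List.length_append]
      push_cast; ring

theorem cGo_start (a : Char) (p t : List Char) (hp : a ∉ p) (n : Nat) :
    cGo a (p ++ a :: t) (n+1) (-1) = (p.length : Int) + 1 + cGo a t n (-1) := by
  have hmem : a ∈ p ++ a :: t := by simp
  have hidx : List.idxOf a (p ++ a :: t) = p.length := by
    rw [List.idxOf_append, if_neg hp]
    simp
  rw [cGo]
  norm_num [PySem.Chars.findFrom_zero, find_singleton, hmem, hidx]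
  rw [if_neg (by omega : ¬ ((p.length : Nat) : Int) = -1)]
  have h2 := cGo_shift a p t hp n (-1) (by omega) (by omega)
  have h3 : (p.length : Int) + 1 + (-1) = ((p.length : Nat) : Int) := by ring
  rw [h3] at h2
  exact h2

theorem cGo_nomem (a : Char) (cs : List Char) (h : a ∉ cs) (n : Nat) :
    cGo a cs (n+1) (-1) = (cs.length : Int) := by
  simp [cGo, PySem.Chars.findFrom_zero, find_singleton, h]

theorem foldl_len_shift :
    ∀ (L : List (List Char)) (s : Int),
      L.foldl (fun acc l => acc + (l.length : Int) + 1) s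
        = s + L.foldl (fun acc l => acc + (l.length : Int) + 1) 0 := by
  intro L
  induction L with
  | nil => simp
  | cons x L ih => intro s; simp only [List.foldl_cons]; rw [ih, ih (0 + _ + 1)]; ring

theorem bVal_nomem (cs : List Char) (lineno : Int) (h : ('\n' : Char) ∉ cs) (hl : 1 ≤ lineno) :
    bVal cs lineno = (cs.length : Int) := by
  simp [bVal, splitOn_eq_splitCh, splitCh_not_mem _ _ h, hl]

theorem bVal_one (p t : List Char) (hp : ('\n' : Char) ∉ p) :
    bVal (p ++ '\n' :: t) 1 = (p.length : Int) := by
  rw [bVal]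
  simp only [splitOn_eq_splitCh, splitCh_first _ _ _ hp]
  have hL1 : 1 ≤ (splitCh '\n' t).length := by rw [length_splitCh]; omega
  rw [if_neg (by simp only [List.length_cons]; push_cast; omega)]
  norm_num
  rw [PySem.List.slice_to _ (le_refl (0 : Int))]
  norm_num

theorem bVal_step (p t : List Char) (hp : ('\n' : Char) ∉ p) (n : Int) (hn : 1 ≤ n) :
    bVal (p ++ '\n' :: t) (n + 1) = (p.length : Int) + 1 + bVal t n := by
  rw [bVal, bVal]
  simp only [splitOn_eq_splitCh, splitCh_first _ _ _ hp]
  set L := splitCh '\n' t with hL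
  by_cases hc : (L.length : Int) ≤ n
  · rw [if_pos (by simp only [List.length_cons]; push_cast; omega), if_pos hc]
    simp only [List.length_append, List.length_cons]; push_cast; ring
  · rw [if_neg (by simp only [List.length_cons]; push_cast; omega), if_neg hc]
    have hnm : n + 1 - 1 = n := by ring
    rw [hnm, PySem.List.slice_to _ (by omega : (0:Int) ≤ n),
        PySem.List.slice_to _ (by omega : (0:Int) ≤ n - 1)]
    have htc : n.toNat = (n-1).toNat + 1 := by omega
    rw [htc, List.take_succ_cons]
    rw [List.foldl_cons, foldl_len_shift]
    rw [PySem.List.pyGetD_eq_getElem _ _ (by omega) (by simp only [List.length_cons]; push_cast; omega),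
        PySem.List.pyGetD_eq_getElem _ _ (by omega) (by push_cast; omega)]
    have hget : (p :: L)[n.toNat]'(by simp only [List.length_cons]; push_cast; omega)
        = L[(n-1).toNat]'(by push_cast; omega) := by
      simp only [htc, List.getElem_cons_succ]
    rw [hget]
    ring

theorem main_eq (n : Nat) : ∀ cs : List Char, cGo '\n' cs (n+1) (-1) = bVal cs ((n : Int) + 1) := by
  induction n with
  | zero =>
    intro cs
    by_cases h : ('\n' : Char) ∈ cs
    · rcases exists_first_split _ _ h with ⟨p, t, rfl, hp⟩
      rw [cGo_start _ _ _ hp 0]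
      simp [cGo, bVal_one _ _ hp]
    · rw [cGo_nomem _ _ h, bVal_nomem _ _ h (by norm_num)]
  | succ n ih =>
    intro cs
    by_cases h : ('\n' : Char) ∈ cs
    · rcases exists_first_split _ _ h with ⟨p, t, rfl, hp⟩
      rw [cGo_start _ _ _ hp (n+1), ih t]
      have := bVal_step p t hp ((n : Int) + 1) (by omega)
      rw [← this]; push_cast; ring_nf
    · rw [cGo_nomem _ _ h, bVal_nomem _ _ h (by push_cast; omega)]

theorem alt_eq_bVal (src : String) (lineno : Int) (hl : 1 ≤ lineno) :
    nth_eol_alt src lineno = bVal src.toList lineno := by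
  have htl : ("\n" : String).toList = ['\n'] := by decide
  have hsplit : PySem.Str.split? src "\n"
      = some ((PySem.Chars.splitOn src.toList ['\n']).map String.ofList) := by
    unfold PySem.Str.split?
    rw [htl]
    simp [PySem.Chars.split?]
  rw [nth_eol_alt, bVal]
  simp only [hsplit, Option.getD_some]
  set L := PySem.Chars.splitOn src.toList ['\n'] with hLdef
  rw [List.length_map]
  by_cases hc : (L.length : Int) ≤ lineno
  · rw [if_pos hc, if_pos hc, PySem.Str.len_eq]
  · rw [if_neg hc, if_neg hc]
    have h0 : (0 : Int) ≤ lineno - 1 := by omega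
    rw [PySem.List.slice_to _ h0, PySem.List.slice_to _ h0]
    rw [← List.map_take, List.foldl_map]
    simp only [PySem.Str.len_eq, String.toList_ofList]
    rw [PySem.List.pyGetD_eq_getElem _ _ (by omega) (by simp only [List.length_map]; push_cast; omega),
        PySem.List.pyGetD_eq_getElem _ _ (by omega) (by push_cast; omega),
        List.getElem_map, String.toList_ofList]

-- ===== VERDICT (by name: the statement is the Claim_ definition above) =====
theorem nth_eol_spec : Claim_equal_nth_eol := by
  intro src lineno _ hpre
  unfold Spec_nth_eol
  unfold Pre_nth_eol at hpre
  have h1 : nth_eol src lineno = cGo '\n' src.toList lineno.toNat (-1) := by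
    unfold nth_eol; exact nthEolGo_eq_cGo src lineno.toNat (-1)
  have h2 : lineno.toNat = (lineno.toNat - 1) + 1 := by omega
  have h3 : ((lineno.toNat - 1 : Nat) : Int) + 1 = lineno := by omega
  rw [h1, h2, main_eq (lineno.toNat - 1) src.toList, h3, alt_eq_bVal src lineno hpre]
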